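-- pv_equiv track=rewrite | github.com/trofik00777/EgeInformatics | ex16/3821.py | f
-- ===== SOURCE A (Python) =====
-- def f(n):
--     if n < 2:
--         return 1
--     else:
--         if n % 3 == 0:
--             return f(n // 3) + (-1)
--         else:
--             return f(n - 1) + 17
-- ===== SOURCE B (Python) =====
-- def f(n):
--     if n < 2:
--         return 1
--     digits = []
--     m = n
--     while m > 0:
--         digits.append(m % 3)
--         m //= 3
--     total = 1
--     for d in digits[:-1]:
--         total += 17 * d - 1
--     if digits[-1] == 2:
--         total += 17
--     return total
-- ===== Notes on version B (the rewrite author's own statement) =====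
-- stated objective: alternative
-- what changed: Instead of recursively simulating the subtract/divide process, B computes the result in closed form from n's base-3 digit expansion: each non-leading digit d contributes 17*d-1 and a leading digit 2 contributes 17, added to the base value 1.
import Mathlib
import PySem

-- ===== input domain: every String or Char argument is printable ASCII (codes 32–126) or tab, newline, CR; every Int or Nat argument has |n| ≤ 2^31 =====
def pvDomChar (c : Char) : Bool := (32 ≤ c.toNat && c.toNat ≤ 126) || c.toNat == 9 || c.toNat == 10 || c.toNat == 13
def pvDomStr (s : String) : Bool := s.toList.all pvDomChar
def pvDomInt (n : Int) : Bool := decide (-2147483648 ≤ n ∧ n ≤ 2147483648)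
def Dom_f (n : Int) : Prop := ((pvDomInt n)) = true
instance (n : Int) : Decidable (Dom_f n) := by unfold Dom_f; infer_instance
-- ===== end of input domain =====

-- B computes the answer in closed form from n's base-3 digits (each non-leading digit d adds 17*d-1,
-- a leading 2 adds 17) instead of recursively simulating the subtract/divide process.

-- ===== PORT A =====
def f (n : Int) : Int :=
  if n < 2 then 1
  else if PySem.Int.mod n 3 == 0 then f (PySem.Int.floordiv n 3) + (-1)
  else f (n - 1) + 17
termination_by n.toNat
decreasing_by
  · have h3 : PySem.Int.floordiv n 3 = n / 3 := PySem.Int.floordiv_eq_ediv_of_pos (by norm_num)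
    rw [h3]; omega
  · omega

-- ===== PORT B =====
-- the collection loop of Source B: base-3 digits, least significant first
def digits3 (m : Int) : List Int :=
  if m > 0 then PySem.Int.mod m 3 :: digits3 (PySem.Int.floordiv m 3)
  else []
termination_by m.toNat
decreasing_by
  have h3 : PySem.Int.floordiv m 3 = m / 3 := PySem.Int.floordiv_eq_ediv_of_pos (by norm_num)
  rw [h3]; omega

def f_alt (n : Int) : Int :=
  if n < 2 then 1
  else
    let digits := digits3 n
    let total := digits.dropLast.foldl (fun t d => t + (17 * d - 1)) 1
    if digits.getLast? = some 2 then total + 17 else total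

-- ===== PRECONDITION & SPEC =====
def Spec_f (n : Int) (out : Int) : Prop := out = f_alt n
instance (n : Int) (out : Int) : Decidable (Spec_f n out) := by unfold Spec_f; infer_instance

-- ===== CLAIM (what is proved, stated in full; the proofs are below) =====
def Claim_equal_f : Prop := ∀ (n : Int), Dom_f n → Spec_f n (f n)

-- ===== LEMMAS AND PROOFS =====
theorem foldl_shift (ds : List Int) (a : Int) :
    ds.foldl (fun t d => t + (17 * d - 1)) a = a + ds.foldl (fun t d => t + (17 * d - 1)) 0 := by
  induction ds generalizing a with
  | nil => simp
  | cons d ds ih =>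
    simp only [List.foldl_cons]
    rw [ih (a + (17 * d - 1)), ih (0 + (17 * d - 1))]
    ring

theorem digits3_pos (m : Int) (h : 0 < m) :
    digits3 m = PySem.Int.mod m 3 :: digits3 (PySem.Int.floordiv m 3) := by
  rw [digits3]; simp [h]

theorem digits3_ne_nil (m : Int) (h : 0 < m) : digits3 m ≠ [] := by
  rw [digits3_pos m h]; simp

theorem getLast?_cons_ne_nil {α : Type} (a : α) (l : List α) (h : l ≠ []) :
    (a :: l).getLast? = l.getLast? := by
  cases l with
  | nil => exact absurd rfl h
  | cons b t => exact List.getLast?_cons_cons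

-- f_alt satisfies the divide recurrence
theorem f_alt_div (n : Int) (h2 : 2 ≤ n) (hd : PySem.Int.mod n 3 = 0) :
    f_alt n = f_alt (PySem.Int.floordiv n 3) + (-1) := by
  have hfd : PySem.Int.floordiv n 3 = n / 3 := PySem.Int.floordiv_eq_ediv_of_pos (by norm_num)
  have hm : PySem.Int.mod n 3 = n % 3 := PySem.Int.mod_eq_emod_of_pos (by norm_num)
  rw [hm] at hd
  have hq : 1 ≤ n / 3 := by omega
  by_cases hq1 : n / 3 = 1
  · -- n = 3
    have hn3 : n = 3 := by omega
    subst hn3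
    have h33 : PySem.Int.floordiv 3 3 = 1 := by decide
    have d3 : digits3 3 = [0, 1] := by
      rw [digits3_pos 3 (by norm_num), (by decide : PySem.Int.mod 3 3 = 0), h33,
          digits3_pos 1 (by norm_num), (by decide : PySem.Int.mod 1 3 = 1),
          (by decide : PySem.Int.floordiv 1 3 = 0), digits3]
      norm_num
    norm_num [f_alt, d3, h33]
  · have hq2 : 2 ≤ n / 3 := by omega
    have hqpos : 0 < n / 3 := by omega
    have hne := digits3_ne_nil (n / 3) hqpos
    unfold f_alt
    rw [digits3_pos n (by omega), hm, hd, hfd]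
    rw [if_neg (show ¬ n < 2 by omega), if_neg (show ¬ (n : Int) / 3 < 2 by omega)]
    simp only []
    rw [List.dropLast_cons_of_ne_nil hne, getLast?_cons_ne_nil _ _ hne]
    simp only [List.foldl_cons]
    rw [foldl_shift _ (1 + (17 * 0 - 1)), foldl_shift _ 1]
    split_ifs <;> ring

-- f_alt satisfies the subtract recurrence
theorem f_alt_sub (n : Int) (h2 : 2 ≤ n) (hd : PySem.Int.mod n 3 ≠ 0) :
    f_alt n = f_alt (n - 1) + 17 := by
  have hm : PySem.Int.mod n 3 = n % 3 := PySem.Int.mod_eq_emod_of_pos (by norm_num)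
  rw [hm] at hd
  by_cases hn2 : n = 2
  · subst hn2
    have d2 : digits3 2 = [2] := by
      rw [digits3_pos 2 (by norm_num), (by decide : PySem.Int.mod 2 3 = 2),
          (by decide : PySem.Int.floordiv 2 3 = 0), digits3]
      norm_num
    norm_num [f_alt, d2]
  · have h4 : 4 ≤ n := by
      rcases (by omega : n = 3 ∨ 4 ≤ n) with h | h
      · exfalso; apply hd; omega
      · exact h
    have hq : (n - 1) / 3 = n / 3 := by omega
    have hm' : (n - 1) % 3 = n % 3 - 1 := by omega
    have hqpos : 0 < n / 3 := by omega
    have hne := digits3_ne_nil (n / 3) hqpos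
    have hfd : ∀ m : Int, PySem.Int.floordiv m 3 = m / 3 :=
      fun m => PySem.Int.floordiv_eq_ediv_of_pos (by norm_num)
    have hmm : ∀ m : Int, PySem.Int.mod m 3 = m % 3 :=
      fun m => PySem.Int.mod_eq_emod_of_pos (by norm_num)
    unfold f_alt
    rw [digits3_pos n (by omega), digits3_pos (n - 1) (by omega),
        hfd, hfd, hmm, hmm, hq, hm']
    rw [if_neg (show ¬ n < 2 by omega), if_neg (show ¬ (n : Int) - 1 < 2 by omega)]
    simp only []
    rw [List.dropLast_cons_of_ne_nil hne, List.dropLast_cons_of_ne_nil hne,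
        getLast?_cons_ne_nil _ _ hne, getLast?_cons_ne_nil _ _ hne]
    simp only [List.foldl_cons]
    rw [foldl_shift _ (1 + (17 * (n % 3) - 1)), foldl_shift _ (1 + (17 * (n % 3 - 1) - 1))]
    split_ifs <;> ring

theorem f_eq_f_alt (n : Int) : f n = f_alt n := by
  fun_induction f n with
  | case1 n h =>
    rw [f_alt, if_pos h]
  | case2 n h hm ih =>
    rw [f_alt_div n (by omega) (by simpa using hm), ih]
  | case3 n h hm ih =>
    rw [f_alt_sub n (by omega) (by simpa using hm), ih]

-- ===== VERDICT (by name: the statement is the Claim_ definition above) =====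
theorem f_spec : Claim_equal_f := by
  intro n _
  unfold Spec_f
  exact f_eq_f_alt n
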